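-- pv_equiv track=rewrite | github.com/Bonface-Odhiambo/150-Leetcode | lastflowerpetals.py | lastFlowerPetals
-- ===== SOURCE A (Python) =====
-- def lastFlowerPetals(flowers, nights):
--     # Define modulo constant to handle large numbers
--     MOD = 1000000007  # 10^9 + 7
--
--     # Handle base case for single flower
--     if flowers == 1:
--         return 1
--
--     # Initialize variables
--     # last_flower tracks the petals in last flower
--     # increment tracks how much we add each night
--     last_flower = flowers    # Initially, sum of all 1s
--     increment = flowers      # Initially, sum of all flowers
--
--     # Simulate each night
--     for _ in range(nights):
--         # Add current increment to last flower
--         last_flower = (last_flower + increment) % MOD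
--
--         # Increase increment by number of flowers
--         # Because each position will contribute one more petal
--         increment = (increment + flowers) % MOD
--
--     return last_flower
-- ===== SOURCE B (Python) =====
-- def lastFlowerPetals(flowers, nights):
--     # Closed-form: after n nights the last flower holds flowers*(1 + n(n+1)/2) petals (mod 1e9+7)
--     MOD = 1000000007
--     if flowers == 1:
--         return 1
--     if nights <= 0:
--         return flowers
--     return flowers * (1 + nights * (nights + 1) // 2) % MOD
-- ===== Notes on version B (the rewrite author's own statement) =====
-- stated objective: faster
-- what changed: Replaced the O(nights) night-by-night simulation loop with the closed-form arithmetic-series value flowers*(1 + nights*(nights+1)/2) mod 1e9+7.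
import Mathlib
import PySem

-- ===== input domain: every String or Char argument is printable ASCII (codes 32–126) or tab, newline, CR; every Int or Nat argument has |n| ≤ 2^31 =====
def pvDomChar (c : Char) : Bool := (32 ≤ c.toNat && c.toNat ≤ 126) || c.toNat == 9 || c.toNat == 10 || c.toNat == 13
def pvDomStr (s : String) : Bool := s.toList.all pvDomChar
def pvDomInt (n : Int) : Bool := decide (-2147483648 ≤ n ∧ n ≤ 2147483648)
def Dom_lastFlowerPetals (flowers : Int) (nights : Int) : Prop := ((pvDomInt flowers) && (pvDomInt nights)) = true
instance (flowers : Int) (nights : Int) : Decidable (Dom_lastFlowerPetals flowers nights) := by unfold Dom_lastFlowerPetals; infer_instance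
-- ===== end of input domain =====

-- B replaces A's O(nights) simulation loop by the closed-form arithmetic series (objective: faster).

-- ===== PORT A =====
def lastFlowerPetals (flowers : Int) (nights : Int) : Int :=
  if flowers == 1 then 1
  else
    ((PySem.List.pyRange 0 nights 1).foldl
      (fun (st : Int × Int) _ =>
        (PySem.Int.mod (st.1 + st.2) 1000000007, PySem.Int.mod (st.2 + flowers) 1000000007))
      (flowers, flowers)).1

-- ===== PORT B =====
def lastFlowerPetals_alt (flowers : Int) (nights : Int) : Int :=
  if flowers == 1 then 1
  else if nights ≤ 0 then flowers
  else PySem.Int.mod (flowers * (1 + PySem.Int.floordiv (nights * (nights + 1)) 2)) 1000000007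

-- ===== PRECONDITION & SPEC =====
def Spec_lastFlowerPetals (flowers : Int) (nights : Int) (out : Int) : Prop := out = lastFlowerPetals_alt flowers nights
instance (flowers : Int) (nights : Int) (out : Int) : Decidable (Spec_lastFlowerPetals flowers nights out) := by unfold Spec_lastFlowerPetals; infer_instance

-- ===== CLAIM (what is proved, stated in full; the proofs are below) =====
def Claim_equal_lastFlowerPetals : Prop := ∀ (flowers : Int) (nights : Int), Dom_lastFlowerPetals flowers nights → Spec_lastFlowerPetals flowers nights (lastFlowerPetals flowers nights)

-- ===== LEMMAS AND PROOFS =====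

-- Loop invariant: after n ≥ 1 nights the fold state is
-- ((flowers*(1 + n(n+1)/2)) % M, (flowers*(n+1)) % M).
theorem lastFlowerPetals_loop (flowers : Int) (n : Nat) (hn : 1 ≤ n) :
    (PySem.List.pyRange 0 (n : Int) 1).foldl
      (fun (st : Int × Int) _ =>
        (PySem.Int.mod (st.1 + st.2) 1000000007, PySem.Int.mod (st.2 + flowers) 1000000007))
      (flowers, flowers)
    = ((flowers * (1 + ((n * (n + 1) / 2 : Nat) : Int))) % 1000000007,
       (flowers * ((n : Int) + 1)) % 1000000007) := by
  induction n with
  | zero => omega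
  | succ m ih =>
    by_cases hm : 1 ≤ m
    · have hsplit : PySem.List.pyRange 0 ((m + 1 : Nat) : Int) 1
          = PySem.List.pyRange 0 (m : Int) 1 ++ [(m : Int)] := by
        push_cast
        exact PySem.List.pyRange_one_succ_right (by positivity)
      rw [hsplit, List.foldl_append, ih hm]
      simp only [List.foldl_cons, List.foldl_nil]
      have hM : (0 : Int) < 1000000007 := by norm_num
      simp only [PySem.Int.mod_eq_emod_of_pos hM]
      have hdvd : 2 ∣ m * (m + 1) := (Nat.even_mul_succ_self m).two_dvd
      have hexp : (m + 1) * (m + 1 + 1) = m * (m + 1) + 2 * (m + 1) := by ring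
      have htri : ((m + 1) * (m + 1 + 1) / 2 : Nat) = (m * (m + 1) / 2 : Nat) + (m + 1) := by
        omega
      simp only [Prod.mk.injEq]
      constructor
      · rw [htri, ← Int.add_emod]
        congr 1
        push_cast
        ring
      · rw [Int.emod_add_emod]
        congr 1
        push_cast
        ring
    · have hm0 : m = 0 := by omega
      subst hm0
      have h1 : PySem.List.pyRange 0 ((1 : Nat) : Int) 1 = [0] := by
        simpa using PySem.List.pyRange_one_singleton (a := 0)
      rw [h1]
      simp only [List.foldl_cons, List.foldl_nil]
      have hM : (0 : Int) < 1000000007 := by norm_num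
      simp only [PySem.Int.mod_eq_emod_of_pos hM, Prod.mk.injEq]
      constructor <;> (congr 1; push_cast; ring)

-- ===== VERDICT (by name: the statement is the Claim_ definition above) =====
theorem lastFlowerPetals_spec : Claim_equal_lastFlowerPetals := by
  intro flowers nights _
  unfold Spec_lastFlowerPetals lastFlowerPetals lastFlowerPetals_alt
  by_cases h1 : flowers == 1
  · simp [h1]
  · simp only [h1]
    by_cases hn : nights ≤ 0
    · rw [PySem.List.pyRange_one_eq_nil (by omega)]
      simp [hn]
    · simp only [hn, if_false]
      have hpos : 0 < nights := by omega
      obtain ⟨n, hn'⟩ : ∃ n : Nat, nights = (n : Int) := ⟨nights.toNat, (Int.toNat_of_nonneg (by omega)).symm⟩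
      subst hn'
      have hn1 : 1 ≤ n := by exact_mod_cast hpos
      rw [lastFlowerPetals_loop flowers n hn1]
      have hfd : PySem.Int.floordiv ((n : Int) * ((n : Int) + 1)) 2
          = ((n * (n + 1) / 2 : Nat) : Int) := by
        have := PySem.Int.floordiv_natCast (n * (n + 1)) 2
        push_cast at this ⊢
        exact this
      rw [hfd, PySem.Int.mod_eq_emod_of_pos (by norm_num)]
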